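-- pv_equiv track=rewrite | github.com/lilitha-mdlalana/bootcamp_group_project | team_allocator.py | getPhysicalTeams
-- ===== SOURCE A (Python) =====
-- def getPhysicalTeams(physical_students):
--     student_teams = []
--     temp_teams = []
--     index = 0
--     for student in physical_students:
--         index += 1;
--         temp_teams.append(student)
--         if index == 4:
--             student_teams.append(list(temp_teams))
--             temp_teams.clear()
--             index = 0
--     return student_teams
-- ===== SOURCE B (Python) =====
-- def getPhysicalTeams(physical_students):
--     n = len(physical_students)
--     return [physical_students[i:i + 4] for i in range(0, n - n % 4, 4)]
-- ===== Notes on version B (the rewrite author's own statement) =====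
-- stated objective: idiomatic
-- what changed: Replaces the element-by-element loop with a counter and temp buffer by a single slicing comprehension over a stride-4 range that stops before the partial final team.
import Mathlib
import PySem

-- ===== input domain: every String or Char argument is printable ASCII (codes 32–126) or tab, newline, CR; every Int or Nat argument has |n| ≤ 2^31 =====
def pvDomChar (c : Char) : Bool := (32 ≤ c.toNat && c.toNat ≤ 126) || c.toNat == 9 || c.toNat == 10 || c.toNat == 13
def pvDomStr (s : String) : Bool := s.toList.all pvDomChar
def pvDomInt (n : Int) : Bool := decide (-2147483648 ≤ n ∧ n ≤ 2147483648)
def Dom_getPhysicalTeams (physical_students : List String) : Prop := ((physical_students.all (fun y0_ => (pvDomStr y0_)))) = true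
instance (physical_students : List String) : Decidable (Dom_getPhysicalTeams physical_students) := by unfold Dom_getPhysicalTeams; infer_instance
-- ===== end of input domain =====

-- B replaces A's counter-and-buffer loop with a stride-4 slicing comprehension (idiomatic; same cost).

-- ===== PORT A =====
-- literal port of A: fold over the students carrying (student_teams, temp_teams, index)
def getPhysicalTeams (physical_students : List String) : List (List String) :=
  let st := physical_students.foldl
    (fun (st : List (List String) × List String × Int) student =>
      let teams := st.1
      let temp := st.2.1 ++ [student]
      let index := st.2.2 + 1
      if index == 4 then (teams ++ [temp], [], 0) else (teams, temp, index))
    ([], [], 0)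
  st.1

-- ===== PORT B =====
-- literal port of B: [physical_students[i:i+4] for i in range(0, n - n % 4, 4)]
def getPhysicalTeams_alt (physical_students : List String) : List (List String) :=
  let n : Int := physical_students.length
  (PySem.List.pyRange 0 (n - PySem.Int.mod n 4) 4).map
    (fun i => PySem.List.slice physical_students (some i) (some (i + 4)))

-- ===== PRECONDITION & SPEC =====
def Spec_getPhysicalTeams (physical_students : List String) (out : List (List String)) : Prop := out = getPhysicalTeams_alt physical_students
instance (physical_students : List String) (out : List (List String)) : Decidable (Spec_getPhysicalTeams physical_students out) := by unfold Spec_getPhysicalTeams; infer_instance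

-- ===== CLAIM (what is proved, stated in full; the proofs are below) =====
def Claim_equal_getPhysicalTeams : Prop := ∀ (physical_students : List String), Dom_getPhysicalTeams physical_students → Spec_getPhysicalTeams physical_students (getPhysicalTeams physical_students)

-- ===== LEMMAS AND PROOFS =====

-- reference chunking: successive complete groups of four
def chunk4 : List String → List (List String)
  | a :: b :: c :: d :: t => [a, b, c, d] :: chunk4 t
  | _ => []

-- A's fold, started at a team boundary, appends chunk4 of the remaining list
theorem foldA_eq (l : List String) : ∀ (teams : List (List String)),
    (l.foldl
      (fun (st : List (List String) × List String × Int) student =>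
        let t := st.1
        let temp := st.2.1 ++ [student]
        let index := st.2.2 + 1
        if index == 4 then (t ++ [temp], [], 0) else (t, temp, index))
      (teams, [], 0)).1 = teams ++ chunk4 l := by
  induction l using chunk4.induct with
  | case1 a b c d t ih =>
      intro teams
      have ih' := ih (teams ++ [[a, b, c, d]])
      simp only [List.foldl] at ih' ⊢
      norm_num at ih' ⊢
      rw [ih']
      simp [chunk4]
  | case2 x hx =>
      intro teams
      match x, hx with
      | [], _ => simp [chunk4]
      | [a], _ => simp [List.foldl, chunk4]
      | [a, b], _ => simp [List.foldl, chunk4]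
      | [a, b, c], _ => simp [List.foldl, chunk4]
      | a :: b :: c :: d :: t, hx => exact absurd rfl (hx a b c d t)

-- B's comprehension equals chunk4
theorem altB_eq (l : List String) : getPhysicalTeams_alt l = chunk4 l := by
  have hq : ∀ (m : List String),
      ((List.range (m.length / 4)).map
        (fun j => (m.drop (4 * j)).take 4)) = chunk4 m := by
    intro m
    induction m using chunk4.induct with
    | case1 a b c d t ih =>
        have hlen : (a :: b :: c :: d :: t).length / 4 = t.length / 4 + 1 := by
          simp [List.length_cons]; omega
        rw [hlen, List.range_succ_eq_map, List.map_cons, List.map_map]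
        simp only [chunk4]
        have h1 : List.take 4 (List.drop (4 * 0) (a :: b :: c :: d :: t)) = [a, b, c, d] := rfl
        have h2 : List.map ((fun j => List.take 4 (List.drop (4 * j) (a :: b :: c :: d :: t))) ∘ Nat.succ)
            (List.range (t.length / 4)) = chunk4 t := by
          rw [← ih]
          apply List.map_congr_left
          intro j _
          simp only [Function.comp]
          rw [show 4 * Nat.succ j = 4 * j + 4 by omega, Nat.add_comm (4 * j) 4,
              ← List.drop_drop]
          rfl
        rw [h1, h2]
    | case2 x hx =>
        match x, hx with
        | [], _ => simp [chunk4]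
        | [a], _ => simp [chunk4]
        | [a, b], _ => simp [chunk4]
        | [a, b, c], _ => simp [chunk4]
        | a :: b :: c :: d :: t, hx => exact absurd rfl (hx a b c d t)
  -- rewrite B's range into List.range form
  have hmod : (l.length : Int) - PySem.Int.mod (l.length : Int) 4
      = 4 * ((l.length / 4 : Nat) : Int) := by
    have h4 : PySem.Int.mod (l.length : Int) 4 = (l.length : Int) % 4 := by
      rw [PySem.Int.mod, Int.fmod_eq_emod]; norm_num
    rw [h4]; push_cast; omega
  show (PySem.List.pyRange 0 ((l.length : Int) - PySem.Int.mod (l.length : Int) 4) 4).map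
      (fun i => PySem.List.slice l (some i) (some (i + 4))) = chunk4 l
  rw [hmod, PySem.List.pyRange_of_pos 0 _ (by norm_num), List.map_map]
  rw [← hq l]
  by_cases h0 : l.length / 4 = 0
  · simp [h0]
  · rw [if_pos (by push_cast; omega)]
    have : ((4 * ((l.length / 4 : Nat) : Int) - 0 + 4 - 1) / 4).toNat = l.length / 4 := by
      omega
    rw [this]
    apply List.map_congr_left
    intro j hj
    simp only [Function.comp, zero_add]
    have h4j : (4 : Int) * (j : Int) = ((4 * j : Nat) : Int) := by push_cast; ring
    rw [h4j, show ((4 * j : Nat) : Int) + 4 = ((4 * j + 4 : Nat) : Int) by push_cast; ring,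
        PySem.List.slice_natCast]
    congr 1
    omega

-- ===== VERDICT (by name: the statement is the Claim_ definition above) =====
theorem getPhysicalTeams_spec : Claim_equal_getPhysicalTeams := by
  intro l _
  unfold Spec_getPhysicalTeams
  rw [altB_eq]
  unfold getPhysicalTeams
  simpa using foldA_eq l []
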